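-- pv_equiv track=rewrite | github.com/nirvanabear/code-horde | cti/module_8/bigram_frequency_analyzer.py | third_word_counts
-- ===== SOURCE A (Python) =====
-- def third_word_counts(text_list, phrase_dict):
--
--     for p in range(len(text_list) - 2):
--         # take the word and next word in sequence
--         phrase = text_list[p] + text_list[p+1]
--         if phrase not in phrase_dict:
--             phrase_dict[phrase] = dict()
--             # for each matched instance of that sequence in text,
--             # store in a sub-dictionary, with counts
--             for q in range(len(text_list) - 2):
--                 if phrase == text_list[q] + text_list[q+1]:
--                     if text_list[q+2] not in phrase_dict[phrase]:
--                         phrase_dict[phrase][text_list[q+2]] = 1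
--                     else:
--                         phrase_dict[phrase][text_list[q+2]] += 1
--
--     return phrase_dict
-- ===== SOURCE B (Python) =====
-- def third_word_counts(text_list, phrase_dict):
--     # Stage 1: one pass over consecutive word triples, tallying third words
--     # for bigrams absent from the incoming phrase_dict into a separate dict.
--     new_counts = {}
--     for w1, w2, w3 in zip(text_list, text_list[1:], text_list[2:]):
--         phrase = w1 + w2
--         if phrase in phrase_dict:
--             continue
--         sub = new_counts.setdefault(phrase, {})
--         sub[w3] = sub.get(w3, 0) + 1
--     # Stage 2: append the freshly built entries to phrase_dict.
--     phrase_dict.update(new_counts)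
--     return phrase_dict
-- ===== Notes on version B (the rewrite author's own statement) =====
-- stated objective: faster
-- what changed: A rescans the whole text with an inner loop the moment a new bigram appears; B is a two-stage pass: it zips the text with its two shifted tails to iterate word triples once, tallies third words for non-preexisting bigrams into a separate new_counts dict, and appends those entries with one dict.update at the end.
import Mathlib
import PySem

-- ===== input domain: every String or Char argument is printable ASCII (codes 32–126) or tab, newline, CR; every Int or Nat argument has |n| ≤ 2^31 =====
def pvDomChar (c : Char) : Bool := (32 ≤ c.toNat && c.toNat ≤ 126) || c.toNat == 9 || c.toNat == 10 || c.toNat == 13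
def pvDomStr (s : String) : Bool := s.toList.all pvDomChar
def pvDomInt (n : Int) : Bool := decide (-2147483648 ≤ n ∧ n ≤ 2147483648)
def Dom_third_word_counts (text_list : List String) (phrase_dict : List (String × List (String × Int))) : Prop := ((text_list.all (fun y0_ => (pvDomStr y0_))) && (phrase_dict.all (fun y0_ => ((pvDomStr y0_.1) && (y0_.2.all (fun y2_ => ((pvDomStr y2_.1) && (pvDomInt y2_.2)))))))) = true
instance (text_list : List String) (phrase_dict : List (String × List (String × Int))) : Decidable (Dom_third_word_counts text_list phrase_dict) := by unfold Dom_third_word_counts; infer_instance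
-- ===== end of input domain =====

-- B replaces A's quadratic index loops (a full inner rescan of the text at each new bigram) by a
-- two-stage linear pass: zip the text with its two shifted tails to walk word triples once, tally
-- third words of non-preexisting bigrams into a separate new_counts dict, then append those entries
-- with one dict.update (objective: faster). Both A and B mutate and return phrase_dict in Python;
-- the equivalence proved here is about the returned value.

-- ===== PORT A =====
def third_word_counts (text_list : List String) (phrase_dict : List (String × List (String × Int))) : List (String × List (String × Int)) :=
  -- dict-of-dicts encoded as PySem.Dict String (PySem.Dict String Int)
  let d0 : PySem.Dict String (PySem.Dict String Int) :=
    PySem.Dict.mk (phrase_dict.map (fun kv => (kv.1, PySem.Dict.mk kv.2)))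
  let r := PySem.List.pyRange 0 (PySem.List.len text_list - 2) 1
  let final := r.foldl (fun d p =>
    -- indices p, p+1, p+2 are always in range, so pyGetD is exact (never the default)
    let phrase := PySem.List.pyGetD text_list p "" ++ PySem.List.pyGetD text_list (p+1) ""
    if d.contains phrase then d
    else
      r.foldl (fun d q =>
        if phrase = PySem.List.pyGetD text_list q "" ++ PySem.List.pyGetD text_list (q+1) "" then
          -- phrase_dict[phrase][third] mutation, written back at the same key (position kept)
          let sub := d.getD phrase PySem.Dict.empty
          if sub.contains (PySem.List.pyGetD text_list (q+2) "") = false then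
            d.insert phrase (sub.insert (PySem.List.pyGetD text_list (q+2) "") 1)
          else
            d.insert phrase (sub.modify (PySem.List.pyGetD text_list (q+2) "") 0 (fun v => v + 1))
        else d) (d.insert phrase PySem.Dict.empty)) d0
  final.items.map (fun kv => (kv.1, kv.2.items))

-- ===== PORT B =====
def third_word_counts_alt (text_list : List String) (phrase_dict : List (String × List (String × Int))) : List (String × List (String × Int)) :=
  let pdd : PySem.Dict String (PySem.Dict String Int) :=
    PySem.Dict.mk (phrase_dict.map (fun kv => (kv.1, PySem.Dict.mk kv.2)))
  -- zip(text_list, text_list[1:], text_list[2:]) — the consecutive word triples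
  let triples := text_list.zip ((text_list.drop 1).zip (text_list.drop 2))
  -- stage 1: tally third words of non-preexisting bigrams into new_counts
  let new_counts := triples.foldl (fun nc t =>
    let phrase := t.1 ++ t.2.1
    if pdd.contains phrase then nc
    else
      -- setdefault(phrase, {}) then sub[w3] = sub.get(w3, 0) + 1, written back in place
      let sub := nc.getD phrase PySem.Dict.empty
      nc.insert phrase (sub.insert t.2.2 (sub.getD t.2.2 0 + 1))) PySem.Dict.empty
  -- stage 2: phrase_dict.update(new_counts)
  (pdd.update new_counts.items).items.map (fun kv => (kv.1, kv.2.items))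

-- ===== PRECONDITION & SPEC =====
def Spec_third_word_counts (text_list : List String) (phrase_dict : List (String × List (String × Int))) (out : List (String × List (String × Int))) : Prop := out = third_word_counts_alt text_list phrase_dict
instance (text_list : List String) (phrase_dict : List (String × List (String × Int))) (out : List (String × List (String × Int))) : Decidable (Spec_third_word_counts text_list phrase_dict out) := by unfold Spec_third_word_counts; infer_instance

-- ===== CLAIM (what is proved, stated in full; the proofs are below) =====
def Claim_equal_third_word_counts : Prop := ∀ (text_list : List String) (phrase_dict : List (String × List (String × Int))), Dom_third_word_counts text_list phrase_dict → Spec_third_word_counts text_list phrase_dict (third_word_counts text_list phrase_dict)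

-- ===== LEMMAS AND PROOFS =====

-- proof-only helpers
def pvF (tl : List String) (p : Int) : String × String :=
  (PySem.List.pyGetD tl p "" ++ PySem.List.pyGetD tl (p+1) "", PySem.List.pyGetD tl (p+2) "")

def pvPs (tl : List String) : List (String × String) :=
  (PySem.List.pyRange 0 (PySem.List.len tl - 2) 1).map (pvF tl)

def pvZs (tl : List String) : List (String × String) :=
  (tl.zip ((tl.drop 1).zip (tl.drop 2))).map (fun t => (t.1 ++ t.2.1, t.2.2))

def pvCstep (sub : PySem.Dict String Int) (th : String) : PySem.Dict String Int :=
  if sub.contains th = false then sub.insert th 1 else sub.modify th 0 (fun v => v + 1)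

def pvCount (l : List (String × String)) (ph : String) : PySem.Dict String Int :=
  l.foldl (fun sub x => if ph = x.1 then pvCstep sub x.2 else sub) PySem.Dict.empty

def pvInner (full : List (String × String)) (ph : String)
    (d : PySem.Dict String (PySem.Dict String Int)) : PySem.Dict String (PySem.Dict String Int) :=
  full.foldl (fun d q =>
    if ph = q.1 then
      let sub := d.getD ph PySem.Dict.empty
      if sub.contains q.2 = false then d.insert ph (sub.insert q.2 1)
      else d.insert ph (sub.modify q.2 0 (fun v => v + 1))
    else d) d

def pvStepA (full : List (String × String)) (d : PySem.Dict String (PySem.Dict String Int))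
    (x : String × String) : PySem.Dict String (PySem.Dict String Int) :=
  if d.contains x.1 then d else pvInner full x.1 (d.insert x.1 PySem.Dict.empty)

def pvStepN (ks : List String) (nc : PySem.Dict String (PySem.Dict String Int))
    (x : String × String) : PySem.Dict String (PySem.Dict String Int) :=
  if x.1 ∈ ks then nc
  else
    let sub := nc.getD x.1 PySem.Dict.empty
    nc.insert x.1 (sub.insert x.2 (sub.getD x.2 0 + 1))

def pvL0 (pd : List (String × List (String × Int))) : List (String × PySem.Dict String Int) :=
  pd.map (fun kv => (kv.1, PySem.Dict.mk kv.2))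

def pvNews (ks : List String) (t : List (String × String)) : List String :=
  t.foldl (fun acc x => if x.1 ∈ ks ∨ x.1 ∈ acc then acc else acc ++ [x.1]) []

def pvCan (L0 : List (String × PySem.Dict String Int)) (N : List String)
    (F : String → PySem.Dict String Int) : PySem.Dict String (PySem.Dict String Int) :=
  PySem.Dict.mk (L0 ++ N.map (fun k => (k, F k)))

def pvDecode (d : PySem.Dict String (PySem.Dict String Int)) : List (String × List (String × Int)) :=
  d.items.map (fun kv => (kv.1, kv.2.items))

lemma pv_portA_eq (tl : List String) (pd : List (String × List (String × Int))) :
    third_word_counts tl pd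
      = pvDecode ((pvPs tl).foldl (pvStepA (pvPs tl)) (PySem.Dict.mk (pvL0 pd))) := by
  simp only [third_word_counts, pvDecode, pvPs, pvStepA, pvInner, pvL0, pvF, List.foldl_map]

lemma pv_portB_eq (tl : List String) (pd : List (String × List (String × Int))) :
    third_word_counts_alt tl pd
      = pvDecode ((PySem.Dict.mk (pvL0 pd)).update
          ((pvZs tl).foldl (pvStepN (pd.map (fun kv => kv.1))) PySem.Dict.empty).items) := by
  simp only [third_word_counts_alt, pvDecode, pvZs, pvStepN, pvL0, List.foldl_map,
    PySem.Dict.contains_eq_decide_mem_keys, PySem.Dict.keys_mk, List.map_map,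
    decide_eq_true_eq, Function.comp_def]

lemma pv_ps_eq_zs (tl : List String) : pvPs tl = pvZs tl := by
  apply List.ext_getElem
  · simp only [pvPs, pvZs, List.length_map, PySem.List.length_pyRange_one, PySem.List.len_eq,
      List.length_zip, List.length_drop]
    omega
  · intro k h1 h2
    have hk2 : k + 2 < tl.length := by
      simp only [pvZs, List.length_map, List.length_zip, List.length_drop] at h2
      omega
    have e0 : (0 + (k : Int)).toNat = k := by omega
    have e1 : (0 + (k : Int) + 1).toNat = k + 1 := by omega
    have e2 : (0 + (k : Int) + 2).toNat = k + 2 := by omega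
    simp only [pvPs, pvZs, List.getElem_map, PySem.List.getElem_pyRange_one, pvF,
      List.getElem_zip, List.getElem_drop]
    rw [PySem.List.pyGetD_eq_getElem tl "" (by omega) (by omega),
        PySem.List.pyGetD_eq_getElem tl "" (by omega) (by omega),
        PySem.List.pyGetD_eq_getElem tl "" (by omega) (by omega)]
    simp
    refine ⟨?_, ?_⟩ <;> (congr 1; omega)

lemma pv_cstep' (sub : PySem.Dict String Int) (th : String) :
    sub.insert th (sub.getD th 0 + 1) = pvCstep sub th := by
  by_cases h : sub.contains th = true
  · simp [pvCstep, h, PySem.Dict.modify]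
  · simp only [Bool.not_eq_true] at h
    rw [PySem.Dict.getD_of_not_contains _ _ h]
    simp [pvCstep, h]

lemma pv_inner_insert (l : List (String × String)) (ph : String)
    (d : PySem.Dict String (PySem.Dict String Int)) (sub : PySem.Dict String Int) :
    pvInner l ph (d.insert ph sub)
      = d.insert ph (l.foldl (fun s q => if ph = q.1 then pvCstep s q.2 else s) sub) := by
  induction l generalizing sub with
  | nil => rfl
  | cons q l ih =>
    simp only [pvInner, List.foldl_cons] at *
    by_cases hq : ph = q.1
    · rw [if_pos hq, if_pos hq]
      simp only [PySem.Dict.getD_insert_self]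
      by_cases hc : (sub.contains q.2) = false
      · rw [if_pos hc]
        rw [PySem.Dict.insert_insert_self]
        have := ih (sub.insert q.2 1)
        rw [this]
        congr 1
        simp [pvCstep, hc]
      · rw [if_neg hc]
        rw [PySem.Dict.insert_insert_self]
        have := ih (sub.modify q.2 0 (fun v => v + 1))
        rw [this]
        congr 1
        simp only [Bool.not_eq_false] at hc
        simp [pvCstep, hc]
    · rw [if_neg hq, if_neg hq]
      exact ih sub

lemma pv_news_append (ks : List String) (t : List (String × String)) (x : String × String) :
    pvNews ks (t ++ [x])
      = if x.1 ∈ ks ∨ x.1 ∈ pvNews ks t then pvNews ks t else pvNews ks t ++ [x.1] := by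
  simp [pvNews, List.foldl_append]

lemma pv_mem_news (ks : List String) (t : List (String × String)) (k : String) :
    k ∈ pvNews ks t ↔ k ∈ t.map Prod.fst ∧ k ∉ ks := by
  induction t using List.reverseRecOn with
  | nil => simp [pvNews]
  | append_singleton t x ih =>
    rw [pv_news_append]
    by_cases hx : x.1 ∈ ks ∨ x.1 ∈ pvNews ks t
    · rw [if_pos hx]
      rw [ih]
      simp only [List.map_append, List.mem_append, List.map_cons, List.map_nil,
        List.mem_cons, List.not_mem_nil, or_false]
      constructor
      · rintro ⟨hm, hk⟩; exact ⟨Or.inl hm, hk⟩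
      · rintro ⟨hm, hk⟩
        refine ⟨?_, hk⟩
        rcases hm with hm | he
        · exact hm
        · rcases hx with h1 | h2
          · exact absurd (he ▸ h1) hk
          · have := (ih.mp ((he ▸ h2 : k ∈ pvNews ks t))).1
            exact this
    · rw [if_neg hx]
      push Not at hx
      simp only [List.mem_append, List.map_append, List.map_cons, List.map_nil,
        List.mem_cons, List.not_mem_nil, or_false, ih]
      constructor
      · rintro (⟨hm, hk⟩ | he)
        · exact ⟨Or.inl hm, hk⟩
        · exact ⟨Or.inr he, he ▸ hx.1⟩
      · rintro ⟨hm, hk⟩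
        rcases hm with hm | he
        · exact Or.inl ⟨hm, hk⟩
        · exact Or.inr he

lemma pv_nodup_news (ks : List String) (t : List (String × String)) :
    (pvNews ks t).Nodup := by
  induction t using List.reverseRecOn with
  | nil => simp [pvNews]
  | append_singleton t x ih =>
    rw [pv_news_append]
    by_cases hx : x.1 ∈ ks ∨ x.1 ∈ pvNews ks t
    · rw [if_pos hx]; exact ih
    · rw [if_neg hx]
      push Not at hx
      refine List.Nodup.append ih (List.nodup_singleton _) ?_
      intro a ha hb
      simp only [List.mem_singleton] at hb
      exact hx.2 (hb ▸ ha)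

lemma pv_contains_can (L0 : List (String × PySem.Dict String Int)) (N : List String)
    (F : String → PySem.Dict String Int) (k : String) :
    (pvCan L0 N F).contains k = true ↔ k ∈ L0.map Prod.fst ∨ k ∈ N := by
  simp only [pvCan, PySem.Dict.contains, List.any_append, List.any_eq_true, Bool.or_eq_true,
    List.any_map]
  constructor
  · rintro (⟨p, hp, hb⟩ | ⟨k', hk', hb⟩)
    · exact Or.inl (List.mem_map.mpr ⟨p, hp, by simpa using (beq_iff_eq.mp hb)⟩)
    · simp only [Function.comp] at hb
      exact Or.inr (by rw [← beq_iff_eq.mp hb]; exact hk')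
  · rintro (hm | hm)
    · rcases List.mem_map.mp hm with ⟨p, hp, he⟩
      exact Or.inl ⟨p, hp, beq_iff_eq.mpr he⟩
    · exact Or.inr ⟨k, hm, by simp⟩

lemma pv_get?_can (L0 : List (String × PySem.Dict String Int)) (N : List String)
    (F : String → PySem.Dict String Int) (k : String) (hk : k ∉ L0.map Prod.fst) :
    (pvCan L0 N F).get? k = if k ∈ N then some (F k) else none := by
  have hL0 : List.find? (fun p => p.1 == k) L0 = none := by
    apply List.find?_eq_none.mpr
    intro p hp
    simp only [Bool.not_eq_true, beq_eq_false_iff_ne, ne_eq]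
    intro he
    exact hk (List.mem_map.mpr ⟨p, hp, he⟩)
  simp only [pvCan, PySem.Dict.get?, List.find?_append, hL0, Option.none_or]
  induction N with
  | nil => simp
  | cons n N ih =>
    simp only [List.map_cons, List.find?_cons]
    by_cases hn : n = k
    · subst hn
      simp
    · have hb : (n == k) = false := beq_eq_false_iff_ne.mpr hn
      simp only [hb]
      rw [ih]
      by_cases hkN : k ∈ N
      · rw [if_pos hkN, if_pos (List.mem_cons.mpr (Or.inr hkN))]
      · rw [if_neg hkN, if_neg (by
          intro hm
          rcases List.mem_cons.mp hm with he | hm2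
          · exact hn he.symm
          · exact hkN hm2)]

lemma pv_can_congr (L0 : List (String × PySem.Dict String Int)) (N : List String)
    (F F' : String → PySem.Dict String Int) (h : ∀ k ∈ N, F k = F' k) :
    pvCan L0 N F = pvCan L0 N F' := by
  unfold pvCan
  congr 1
  congr 1
  exact List.map_congr_left (fun k hk => by rw [h k hk])

lemma pv_insert_can_mem (L0 : List (String × PySem.Dict String Int)) (N : List String)
    (F : String → PySem.Dict String Int) (k : String) (v : PySem.Dict String Int)
    (hk : k ∉ L0.map Prod.fst) (hN : k ∈ N) :
    (pvCan L0 N F).insert k v = pvCan L0 N (fun k' => if k' = k then v else F k') := by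
  have hc : (pvCan L0 N F).contains k = true := (pv_contains_can L0 N F k).mpr (Or.inr hN)
  rw [PySem.Dict.insert, if_pos hc]
  simp only [pvCan, List.map_append, List.map_map]
  congr 1
  congr 1
  · have h0 : ∀ p ∈ L0, (fun p => if (p.1 == k) = true then (k, v) else p) p = p := by
      intro p hp
      have hne : ¬ (p.1 == k) = true := by
        simp only [beq_iff_eq]
        exact fun he => hk (List.mem_map.mpr ⟨p, hp, he⟩)
      simp [hne]
    exact (List.map_congr_left h0).trans (by simp)
  · apply List.map_congr_left
    intro k' hk'
    by_cases he : k' = k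
    · subst he; simp
    · simp [Function.comp, he]

lemma pv_insert_can_fresh (L0 : List (String × PySem.Dict String Int)) (N : List String)
    (F : String → PySem.Dict String Int) (k : String) (v : PySem.Dict String Int)
    (hk : k ∉ L0.map Prod.fst) (hN : k ∉ N) :
    (pvCan L0 N F).insert k v = pvCan L0 (N ++ [k]) (fun k' => if k' = k then v else F k') := by
  have hc : ¬ ((pvCan L0 N F).contains k = true) := by
    rw [pv_contains_can]
    rintro (h | h)
    · exact hk h
    · exact hN h
  rw [PySem.Dict.insert, if_neg hc]
  simp only [pvCan, List.map_append, List.map_cons, List.map_nil]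
  have h1 : List.map (fun k' => (k', if k' = k then v else F k')) N
      = List.map (fun k' => (k', F k')) N := by
    apply List.map_congr_left
    intro k' hk'
    have hne : ¬ k' = k := fun he => hN (he ▸ hk')
    simp [hne]
  rw [h1]
  simp

lemma pv_count_append (t : List (String × String)) (x : String × String) (ph : String) :
    pvCount (t ++ [x]) ph = if ph = x.1 then pvCstep (pvCount t ph) x.2 else pvCount t ph := by
  simp [pvCount, List.foldl_append]

lemma pv_count_absent_aux (t : List (String × String)) (ph : String)
    (h : ph ∉ t.map Prod.fst) (sub : PySem.Dict String Int) :
    t.foldl (fun sub x => if ph = x.1 then pvCstep sub x.2 else sub) sub = sub := by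
  induction t generalizing sub with
  | nil => rfl
  | cons y ys ih =>
    simp only [List.map_cons, List.mem_cons] at h
    push Not at h
    simp only [List.foldl_cons, if_neg h.1]
    exact ih h.2 sub

lemma pv_count_absent (t : List (String × String)) (ph : String) (h : ph ∉ t.map Prod.fst) :
    pvCount t ph = PySem.Dict.empty :=
  pv_count_absent_aux t ph h PySem.Dict.empty

lemma pv_A_char (full : List (String × String)) (L0 : List (String × PySem.Dict String Int))
    (t : List (String × String)) :
    t.foldl (pvStepA full) (PySem.Dict.mk L0)
      = pvCan L0 (pvNews (L0.map Prod.fst) t) (pvCount full) := by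
  induction t using List.reverseRecOn with
  | nil => simp [pvNews, pvCan]
  | append_singleton t x ih =>
    rw [List.foldl_append, List.foldl_cons, List.foldl_nil, ih, pv_news_append]
    unfold pvStepA
    by_cases hx : x.1 ∈ L0.map Prod.fst ∨ x.1 ∈ pvNews (L0.map Prod.fst) t
    · rw [if_pos ((pv_contains_can _ _ _ _).mpr hx), if_pos hx]
    · have hc : ¬ ((pvCan L0 (pvNews (L0.map Prod.fst) t) (pvCount full)).contains x.1 = true) :=
        fun h => hx ((pv_contains_can _ _ _ _).mp h)
      rw [if_neg hc, if_neg hx, pv_inner_insert]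
      push Not at hx
      rw [pv_insert_can_fresh _ _ _ _ _ hx.1 hx.2]
      apply pv_can_congr
      intro k hkm
      by_cases he : k = x.1
      · subst he; simp [pvCount]
      · simp [he]

lemma pv_N_char (ks : List String) (t : List (String × String)) :
    t.foldl (pvStepN ks) PySem.Dict.empty = pvCan [] (pvNews ks t) (pvCount t) := by
  induction t using List.reverseRecOn with
  | nil => simp [pvNews, pvCan]; rfl
  | append_singleton t x ih =>
    rw [List.foldl_append, List.foldl_cons, List.foldl_nil, ih, pv_news_append]
    unfold pvStepN
    have hnil : x.1 ∉ ([] : List (String × PySem.Dict String Int)).map Prod.fst := by simp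
    by_cases h1 : x.1 ∈ ks
    · rw [if_pos h1, if_pos (Or.inl h1)]
      apply pv_can_congr
      intro k hkm
      have hk : k ≠ x.1 := by
        intro he
        exact ((pv_mem_news _ _ _).mp hkm).2 (he ▸ h1)
      rw [pv_count_append, if_neg hk]
    · rw [if_neg h1]
      by_cases h2 : x.1 ∈ pvNews ks t
      · rw [if_pos (Or.inr h2)]
        have hget : (pvCan [] (pvNews ks t) (pvCount t)).getD x.1 PySem.Dict.empty
            = pvCount t x.1 := by
          rw [PySem.Dict.getD_eq_get?_getD, pv_get?_can _ _ _ _ hnil, if_pos h2]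
          rfl
        simp only [hget, pv_cstep']
        rw [pv_insert_can_mem _ _ _ _ _ hnil h2]
        apply pv_can_congr
        intro k hkm
        rw [pv_count_append]
        by_cases he : k = x.1
        · subst he; simp
        · simp [he]
      · rw [if_neg (by rintro (h | h); exact h1 h; exact h2 h)]
        have hget : (pvCan [] (pvNews ks t) (pvCount t)).getD x.1 PySem.Dict.empty
            = PySem.Dict.empty := by
          rw [PySem.Dict.getD_eq_get?_getD, pv_get?_can _ _ _ _ hnil, if_neg h2]
          rfl
        simp only [hget, pv_cstep']
        rw [pv_insert_can_fresh _ _ _ _ _ hnil h2]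
        have habs : x.1 ∉ t.map Prod.fst := by
          intro hm
          exact h2 ((pv_mem_news _ _ _).mpr ⟨hm, h1⟩)
        apply pv_can_congr
        intro k hkm
        rw [pv_count_append]
        by_cases he : k = x.1
        · subst he
          simp [pv_count_absent t x.1 habs]
        · simp [he]

-- appending the freshly built entries: update over fresh distinct keys = the canonical merge
lemma pv_update_can (L0 : List (String × PySem.Dict String Int)) (N : List String)
    (F : String → PySem.Dict String Int)
    (hnd : N.Nodup) (hfr : ∀ k ∈ N, k ∉ L0.map Prod.fst) :
    (PySem.Dict.mk L0).update (pvCan [] N F).items = pvCan L0 N F := by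
  have hitems : (pvCan [] N F).items = N.map (fun k => (k, F k)) := by
    simp [pvCan]
  rw [hitems]
  apply PySem.Dict.ext
  rw [PySem.Dict.update]
  have := PySem.Dict.items_foldl_insert_fresh (N.map (fun k => (k, F k)))
      (fun a => a.1) (fun a => a.2) (PySem.Dict.mk L0)
      (by
        intro a ha
        rcases List.mem_map.mp ha with ⟨k, hk, rfl⟩
        simp only [PySem.Dict.contains_eq_decide_mem_keys, PySem.Dict.keys_mk,
          decide_eq_false_iff_not]
        exact hfr k hk)
      (by simpa [List.map_map, Function.comp_def] using hnd)
  simpa [pvCan, PySem.Dict.items, List.map_map, Function.comp_def] using this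

-- ===== VERDICT (by name: the statement is the Claim_ definition above) =====
theorem third_word_counts_spec : Claim_equal_third_word_counts := by
  intro tl pd _
  unfold Spec_third_word_counts
  rw [pv_portA_eq, pv_portB_eq, ← pv_ps_eq_zs]
  have hmap : pd.map (fun kv => kv.1) = (pvL0 pd).map Prod.fst := by
    simp [pvL0]
  rw [hmap, pv_A_char, pv_N_char, pv_update_can _ _ _ (pv_nodup_news _ _)
    (fun k hk => ((pv_mem_news _ _ _).mp hk).2)]
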